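-- pv_equiv track=rewrite | github.com/moneyball-dk/moneyball_app | moneyball/match.py | validate_players
-- ===== SOURCE A (Python) =====
-- from collections import Counter
--
-- def validate_players(w1, w2, l1, l2):
--     # At least one winner
--     if not w1:
--         return 'At least one winner is required'
--     # At least one loser
--     elif not l1:
--         return 'At least one loser is required'
--
--     # No repeated players
--     players = [p for p in [w1, w2, l1, l2] if p is not None]
--     count_players = Counter(players)
--     for player, count in count_players.items():
--         if count > 1:
--             return 'Each player can only appear once.'
--
--     return None
-- ===== SOURCE B (Python) =====
-- def validate_players(w1, w2, l1, l2):
--     if not w1: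
--         return 'At least one winner is required'
--     if not l1:
--         return 'At least one loser is required'
--     # Fixed arity: duplicates exist iff some pair of non-None slots holds equal names.
--     def same(a, b):
--         return a is not None and a == b
--     if (same(w1, w2) or same(w1, l1) or same(w1, l2)
--             or same(w2, l1) or same(w2, l2) or same(l1, l2)):
--         return 'Each player can only appear once.'
--     return None
-- ===== Notes on version B (the rewrite author's own statement) =====
-- stated objective: simpler
-- what changed: Drops the players list, the Counter table and the count>1 scan entirely: with fixed arity 4, B tests the six pairwise equalities of non-None slots directly.
import Mathlib
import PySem

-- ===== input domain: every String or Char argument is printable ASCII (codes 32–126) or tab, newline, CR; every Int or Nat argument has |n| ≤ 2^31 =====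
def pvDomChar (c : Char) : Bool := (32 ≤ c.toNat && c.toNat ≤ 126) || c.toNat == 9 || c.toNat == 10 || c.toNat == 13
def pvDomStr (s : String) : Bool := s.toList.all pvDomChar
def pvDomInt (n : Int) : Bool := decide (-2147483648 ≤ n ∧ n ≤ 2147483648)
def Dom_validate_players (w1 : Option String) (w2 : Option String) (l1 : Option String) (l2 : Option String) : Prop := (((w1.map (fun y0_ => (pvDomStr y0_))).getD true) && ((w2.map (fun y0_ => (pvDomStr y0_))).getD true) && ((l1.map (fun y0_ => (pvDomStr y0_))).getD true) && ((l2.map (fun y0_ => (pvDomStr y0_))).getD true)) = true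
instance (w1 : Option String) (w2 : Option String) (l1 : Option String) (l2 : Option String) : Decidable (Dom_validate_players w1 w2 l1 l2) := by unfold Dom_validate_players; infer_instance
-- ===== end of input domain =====

-- B drops the players list and the Counter scan: with fixed arity 4 it tests the six pairwise equalities of non-None slots directly; objective: simpler.
-- ===== PORT A =====
-- 'for player, count in count_players.items(): if count > 1: return …' — first item with count > 1 stops the loop
def pvDupScan : List (String × Int) → Option String
  | [] => none
  | (_, c) :: rest => if c > 1 then some "Each player can only appear once." else pvDupScan rest

def validate_players (w1 : Option String) (w2 : Option String) (l1 : Option String) (l2 : Option String) : Option String :=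
  if w1.getD "" = "" then some "At least one winner is required"
  else if l1.getD "" = "" then some "At least one loser is required"
  else
    let players := [w1, w2, l1, l2].filterMap id
    let count_players := PySem.Dict.counter players
    pvDupScan count_players.items

-- ===== PORT B =====
-- same(a, b) = 'a is not None and a == b' (Python's str == None is False)
def pvSame (a b : Option String) : Bool :=
  match a with
  | none => false
  | some x => b == some x

def validate_players_alt (w1 : Option String) (w2 : Option String) (l1 : Option String) (l2 : Option String) : Option String :=
  if w1.getD "" = "" then some "At least one winner is required"
  else if l1.getD "" = "" then some "At least one loser is required"
  else if pvSame w1 w2 || pvSame w1 l1 || pvSame w1 l2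
       || pvSame w2 l1 || pvSame w2 l2 || pvSame l1 l2 then
    some "Each player can only appear once."
  else none

-- ===== PRECONDITION & SPEC =====
def Spec_validate_players (w1 : Option String) (w2 : Option String) (l1 : Option String) (l2 : Option String) (out : Option String) : Prop := out = validate_players_alt w1 w2 l1 l2
instance (w1 : Option String) (w2 : Option String) (l1 : Option String) (l2 : Option String) (out : Option String) : Decidable (Spec_validate_players w1 w2 l1 l2 out) := by unfold Spec_validate_players; infer_instance

-- ===== CLAIM (what is proved, stated in full; the proofs are below) =====
def Claim_equal_validate_players : Prop := ∀ (w1 : Option String) (w2 : Option String) (l1 : Option String) (l2 : Option String), Dom_validate_players w1 w2 l1 l2 → Spec_validate_players w1 w2 l1 l2 (validate_players w1 w2 l1 l2)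

-- ===== LEMMAS AND PROOFS =====
-- the Counter-items scan fires iff some element has count > 1
lemma pvDupScan_map (s : List String) (l : List String) :
    pvDupScan (s.map (fun k => (k, (l.count k : Int)))) =
      if s.any (fun k => 1 < l.count k) then some "Each player can only appear once." else none := by
  induction s with
  | nil => simp [pvDupScan]
  | cons x xs ih =>
    simp only [List.map_cons, pvDupScan, List.any_cons, ih]
    by_cases h : 1 < l.count x
    · simp [h]
    · have h' : ¬ ((l.count x : Int) > 1) := by exact_mod_cast h
      simp [h, h']

-- A's duplicate scan answers exactly 'is the list not Nodup'
lemma pvScan_nodup (l : List String) :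
    pvDupScan (PySem.Dict.counter l).items =
      if l.Nodup then none else some "Each player can only appear once." := by
  rw [PySem.Dict.items_counter, pvDupScan_map]
  by_cases h : l.Nodup
  · have : (PySem.Set.ofList l).any (fun k => 1 < l.count k) = false := by
      rw [List.any_eq_false]
      intro x hx
      simp only [decide_eq_true_eq]
      have := List.nodup_iff_count_le_one.mp h x
      omega
    simp [this, h]
  · have : (PySem.Set.ofList l).any (fun k => 1 < l.count k) = true := by
      rw [List.any_eq_true]
      rcases not_forall.mp (fun hc => h (List.nodup_iff_count_le_one.mpr hc)) with ⟨x, hx⟩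
      exact ⟨x, (PySem.Set.mem_ofList _ _).mpr (List.count_pos_iff.mp (by omega)), by simp; omega⟩
    simp [this, h]

-- B's six pairwise tests are false exactly when the filtered players list has no duplicate
lemma pvNodup_filterMap4 (w1 w2 l1 l2 : Option String) :
    (([w1, w2, l1, l2].filterMap id).Nodup) ↔
      (pvSame w1 w2 || pvSame w1 l1 || pvSame w1 l2
       || pvSame w2 l1 || pvSame w2 l2 || pvSame l1 l2) = false := by
  cases w1 <;> cases w2 <;> cases l1 <;> cases l2 <;>
    simp only [List.filterMap_cons, List.filterMap_nil, id_eq, List.nodup_cons, List.nodup_nil,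
      List.mem_cons, List.not_mem_nil, pvSame, Bool.or_eq_false_iff, beq_eq_false_iff_ne, ne_eq,
      Option.some.injEq, or_false, and_true, not_or, not_false_eq_true, true_and, and_self] <;>
    constructor <;> intro h <;> tauto

-- ===== VERDICT (by name: the statement is the Claim_ definition above) =====
theorem validate_players_spec : Claim_equal_validate_players := by
  intro w1 w2 l1 l2 _
  unfold Spec_validate_players
  by_cases h1 : w1.getD "" = ""
  · simp [validate_players, validate_players_alt, h1]
  · by_cases h2 : l1.getD "" = ""
    · simp [validate_players, validate_players_alt, h1, h2]
    · simp only [validate_players, validate_players_alt, if_neg h1, if_neg h2]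
      rw [pvScan_nodup]
      by_cases hn : ([w1, w2, l1, l2].filterMap id).Nodup
      · rw [if_pos hn, (pvNodup_filterMap4 w1 w2 l1 l2).mp hn]
        simp
      · rw [if_neg hn]
        have hb := (pvNodup_filterMap4 w1 w2 l1 l2).not.mp hn
        rw [Bool.not_eq_false] at hb
        rw [hb]
        simp
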